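-- pv_equiv track=rewrite | github.com/katasuner/my-yandex-algorithm-training-5.0 | homework_3/c.py | find_min_deleted
-- ===== SOURCE A (Python) =====
-- def find_min_deleted(n, numbers):
--     if n == 1:
--         return 0
--
--     numbers.sort()
--     frequencies = {}
--     for number in numbers:
--         frequencies[number] = frequencies.get(number, 0) + 1
--
--     max_group = 0
--     numbers_unique = sorted(set(numbers))
--     for i in range(len(numbers_unique)):
--         current = frequencies[numbers_unique[i]]
--         if i < len(numbers_unique) - 1 and numbers_unique[i + 1] == numbers_unique[i] + 1:
--             current += frequencies[numbers_unique[i + 1]]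
--         max_group = max(max_group, current)
--
--     return n - max_group
-- ===== SOURCE B (Python) =====
-- def find_min_deleted(n, numbers):
--     if n == 1:
--         return 0
--     best = 0
--     prev_c = 0
--     cur_v = None
--     cur_c = 0
--     for x in sorted(numbers):
--         if cur_v == x:
--             cur_c += 1
--         else:
--             prev_c = cur_c if cur_v == x - 1 else 0
--             cur_v = x
--             cur_c = 1
--         if best < prev_c + cur_c:
--             best = prev_c + cur_c
--     return n - best
-- ===== Notes on version B (the rewrite author's own statement) =====
-- stated objective: faster
-- what changed: B keeps no frequency dict and no unique-value list at all: it sorts once and does a single streaming scan with O(1) state (current run length, previous adjacent run length, running best), merging consecutive runs on the fly.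
import Mathlib
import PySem

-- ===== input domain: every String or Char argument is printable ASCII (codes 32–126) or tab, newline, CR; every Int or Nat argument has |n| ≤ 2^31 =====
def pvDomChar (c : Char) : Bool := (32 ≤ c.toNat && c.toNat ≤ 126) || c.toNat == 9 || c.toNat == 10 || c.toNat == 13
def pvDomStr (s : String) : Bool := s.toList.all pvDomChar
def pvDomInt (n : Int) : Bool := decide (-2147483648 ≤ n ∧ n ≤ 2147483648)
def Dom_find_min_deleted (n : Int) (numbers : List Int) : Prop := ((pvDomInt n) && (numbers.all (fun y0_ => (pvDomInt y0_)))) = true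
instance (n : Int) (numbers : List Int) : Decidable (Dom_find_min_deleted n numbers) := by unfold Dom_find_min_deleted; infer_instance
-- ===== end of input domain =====

-- B keeps no frequency dict and no unique-value list: it sorts once and does a single streaming
-- scan with O(1) state (current run length, previous adjacent run length, running best).
-- A sorts `numbers` in place; the equivalence proved here is about the return value only
-- (B does not mutate its argument).

-- ===== PORT A =====
def find_min_deleted (n : Int) (numbers : List Int) : Int :=
  if n = 1 then 0
  else
    let ns := PySem.List.sorted numbers (fun x => x) false
    let frequencies := ns.foldl (fun d x => d.insert x (d.getD x 0 + 1)) PySem.Dict.empty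
    let numbers_unique := PySem.List.sorted (PySem.Set.ofList ns) (fun x => x) false
    let max_group := (PySem.List.pyRange 0 (numbers_unique.length : Int) 1).foldl
      (fun mg i =>
        let current := frequencies.getD (PySem.List.pyGetD numbers_unique i 0) 0
        let current :=
          if i < (numbers_unique.length : Int) - 1 ∧
             PySem.List.pyGetD numbers_unique (i + 1) 0 = PySem.List.pyGetD numbers_unique i 0 + 1
          then current + frequencies.getD (PySem.List.pyGetD numbers_unique (i + 1) 0) 0
          else current
        max mg current) 0
    n - max_group

-- ===== PORT B =====
-- the body of B's for-loop: state = (best, prev_c, cur_v, cur_c)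
def pvStepB (st : Int × Int × Option Int × Int) (x : Int) : Int × Int × Option Int × Int :=
  match st with
  | (best, prev_c, cur_v, cur_c) =>
    if cur_v = some x then
      let cur_c := cur_c + 1
      let best := if best < prev_c + cur_c then prev_c + cur_c else best
      (best, prev_c, cur_v, cur_c)
    else
      let prev_c := if cur_v = some (x - 1) then cur_c else 0
      let cur_v := some x
      let cur_c := (1 : Int)
      let best := if best < prev_c + cur_c then prev_c + cur_c else best
      (best, prev_c, cur_v, cur_c)

def find_min_deleted_alt (n : Int) (numbers : List Int) : Int :=
  if n = 1 then 0
  else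
    let st := (PySem.List.sorted numbers (fun x => x) false).foldl pvStepB (0, 0, none, 0)
    n - st.1

-- ===== PRECONDITION & SPEC =====
def Spec_find_min_deleted (n : Int) (numbers : List Int) (out : Int) : Prop := out = find_min_deleted_alt n numbers
instance (n : Int) (numbers : List Int) (out : Int) : Decidable (Spec_find_min_deleted n numbers out) := by unfold Spec_find_min_deleted; infer_instance

-- ===== CLAIM (what is proved, stated in full; the proofs are below) =====
def Claim_equal_find_min_deleted : Prop := ∀ (n : Int) (numbers : List Int), Dom_find_min_deleted n numbers → Spec_find_min_deleted n numbers (find_min_deleted n numbers)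

-- ===== LEMMAS AND PROOFS =====

-- `if a < b then b else a` is `max a b`
theorem pv_if_lt_eq_max (a b : Int) : (if a < b then b else a) = max a b := by
  split <;> omega

-- reading every index of a list back gives the list
theorem pv_map_getD_range (u : List Int) :
    (List.range u.length).map (fun k => u.getD k 0) = u := by
  apply List.ext_getElem
  · simp
  · intro i h1 h2
    simp [List.getD_eq_getElem?_getD, List.getElem?_eq_getElem h2]

-- in a strictly increasing list, v+1 follows v iff v+1 is a member
theorem pv_succ_mem_iff (u : List Int) (hp : u.Pairwise (· < ·)) (k : Nat) (hk : k < u.length) :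
    (u[k] + 1 ∈ u) ↔ ((k : Int) < (u.length : Int) - 1 ∧ u.getD (k + 1) 0 = u[k] + 1) := by
  have hmono : ∀ i j (hi : i < u.length) (hj : j < u.length), i < j → u[i] < u[j] := by
    intro i j hi hj hij
    exact (List.pairwise_iff_getElem.mp hp) i j hi hj hij
  constructor
  · intro hmem
    obtain ⟨j, hj, hje⟩ := List.mem_iff_getElem.mp hmem
    have hkj : k < j := by
      by_contra h
      rcases Nat.lt_or_ge j k with h2 | h2
      · have := hmono j k hj hk h2; omega
      · have : j = k := by omega
        subst this; omega
    have hjk1 : j = k + 1 := by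
      by_contra h
      have hlt : k + 1 < j := by omega
      have h1 := hmono k (k+1) hk (by omega)
      have h2 := hmono (k+1) j (by omega) hj hlt
      have h1' := h1 (by omega)
      omega
    subst hjk1
    refine ⟨by omega, ?_⟩
    rw [List.getD_eq_getElem?_getD, List.getElem?_eq_getElem hj]
    simpa using hje
  · rintro ⟨hlen, heq⟩
    have hk1 : k + 1 < u.length := by omega
    rw [List.getD_eq_getElem?_getD, List.getElem?_eq_getElem hk1] at heq
    simp only [Option.getD_some] at heq
    rw [← heq]
    exact List.getElem_mem _

-- A's loop over the sorted unique values, as a running max of count v + count (v+1) over those values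
theorem pv_foldA (numbers u : List Int) (freq : PySem.Dict Int Int)
    (hfreq : ∀ v, freq.getD v 0 = (numbers.count v : Int))
    (hmem : ∀ x, x ∈ u ↔ x ∈ numbers)
    (hp : u.Pairwise (· < ·)) :
    (PySem.List.pyRange 0 (u.length : Int) 1).foldl
      (fun mg i =>
        max mg
          (if i < (u.length : Int) - 1 ∧
              PySem.List.pyGetD u (i + 1) 0 = PySem.List.pyGetD u i 0 + 1
           then freq.getD (PySem.List.pyGetD u i 0) 0 + freq.getD (PySem.List.pyGetD u (i + 1) 0) 0
           else freq.getD (PySem.List.pyGetD u i 0) 0)) 0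
    = u.foldl (fun mg v => max mg ((numbers.count v : Int) + (numbers.count (v + 1) : Int))) 0 := by
  rw [PySem.List.pyRange_zero_nat, List.foldl_map]
  have hcg : ∀ (acc : Int), ∀ k ∈ List.range u.length,
      (fun mg (k : Nat) =>
        max mg
          (if (k : Int) < (u.length : Int) - 1 ∧
              PySem.List.pyGetD u ((k : Int) + 1) 0 = PySem.List.pyGetD u (k : Int) 0 + 1
           then freq.getD (PySem.List.pyGetD u (k : Int) 0) 0 +
                freq.getD (PySem.List.pyGetD u ((k : Int) + 1) 0) 0
           else freq.getD (PySem.List.pyGetD u (k : Int) 0) 0)) acc k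
      = (fun mg (k : Nat) =>
          max mg ((numbers.count (u.getD k 0) : Int) + (numbers.count (u.getD k 0 + 1) : Int))) acc k := by
    intro acc k hk
    have hk' : k < u.length := List.mem_range.mp hk
    have hcast : ((k : Int) + 1) = ((k + 1 : Nat) : Int) := by push_cast; ring
    simp only [hcast, PySem.List.pyGetD_natCast]
    have hgk : u.getD k 0 = u[k] := by
      rw [List.getD_eq_getElem?_getD, List.getElem?_eq_getElem hk']; rfl
    rw [hgk]
    by_cases hmem1 : u[k] + 1 ∈ u
    · have hcond := (pv_succ_mem_iff u hp k hk').mp hmem1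
      rw [if_pos hcond, hcond.2, hfreq, hfreq]
    · have hcond : ¬ ((k : Int) < (u.length : Int) - 1 ∧ u.getD (k + 1) 0 = u[k] + 1) := by
        intro hc; exact hmem1 ((pv_succ_mem_iff u hp k hk').mpr hc)
      rw [if_neg hcond, hfreq]
      have hz : numbers.count (u[k] + 1) = 0 := by
        rw [List.count_eq_zero]
        intro hmem2; exact hmem1 ((hmem _).mpr hmem2)
      rw [hz]
      simp
  rw [PySem.List.foldl_congr_mem _ _ _ _ hcg]
  conv_rhs => rw [← pv_map_getD_range u]
  rw [List.foldl_map]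

-- running max of f over a list, starting at a
def pvF (f : Int → Int) (a : Int) (l : List Int) : Int :=
  l.foldl (fun m w => max m (f w)) a

-- count-pair term over a list q, and the best value over q itself
def pvT (q : List Int) (w : Int) : Int := (q.count (w - 1) : Int) + (q.count w : Int)
def pvM (q : List Int) : Int := pvF (pvT q) 0 q

theorem pvF_le_iff (f : Int → Int) (l : List Int) :
    ∀ (a c : Int), pvF f a l ≤ c ↔ a ≤ c ∧ ∀ w ∈ l, f w ≤ c := by
  induction l with
  | nil => intro a c; simp [pvF]
  | cons x l ih =>
    intro a c
    simp only [pvF, List.foldl_cons] at *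
    rw [ih (max a (f x)) c]
    constructor
    · rintro ⟨h1, h2⟩
      refine ⟨by omega, ?_⟩
      intro w hw
      rcases List.mem_cons.mp hw with h | h
      · subst h; omega
      · exact h2 w h
    · rintro ⟨h1, h2⟩
      exact ⟨by have := h2 x (List.mem_cons_self); omega,
             fun w hw => h2 w (List.mem_cons_of_mem _ hw)⟩

theorem pvF_le_self (f : Int → Int) (a : Int) (l : List Int) : a ≤ pvF f a l :=
  ((pvF_le_iff f l a (pvF f a l)).mp le_rfl).1

theorem pvF_mem_le (f : Int → Int) (a : Int) (l : List Int) (w : Int) (hw : w ∈ l) :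
    f w ≤ pvF f a l :=
  ((pvF_le_iff f l a (pvF f a l)).mp le_rfl).2 w hw

theorem pvF_congr_mem (f g : Int → Int) (l : List Int) (a : Int)
    (h : ∀ w ∈ l, f w = g w) : pvF f a l = pvF g a l := by
  unfold pvF
  apply PySem.List.foldl_congr_mem
  intro acc x hx
  rw [h x hx]

theorem pvF_append_singleton (f : Int → Int) (a x : Int) (l : List Int) :
    pvF f a (l ++ [x]) = max (pvF f a l) (f x) := by
  simp [pvF]

-- two-accumulator key lemma: replacing f by a pointwise-larger g that stays below max (f w) c
-- does not change the running max once joined with c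
theorem pvF_key (f g : Int → Int) (c : Int) (l : List Int)
    (h1 : ∀ w ∈ l, f w ≤ g w) (h2 : ∀ w ∈ l, g w ≤ max (f w) c) :
    ∀ (a b : Int), a ≤ b → b ≤ max a c → max (pvF g b l) c = max (pvF f a l) c := by
  induction l with
  | nil => intro a b hab hbc; simp only [pvF, List.foldl_nil]; omega
  | cons x l ih =>
    intro a b hab hbc
    simp only [pvF, List.foldl_cons]
    have hx1 := h1 x List.mem_cons_self
    have hx2 := h2 x List.mem_cons_self
    exact ih (fun w hw => h1 w (List.mem_cons_of_mem _ hw))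
             (fun w hw => h2 w (List.mem_cons_of_mem _ hw))
             (max a (f x)) (max b (g x)) (by omega) (by omega)

-- one step of B preserves the run/best invariant
theorem pv_stepB_inv (p : List Int) (v x : Int) (hv : v ∈ p)
    (hle : ∀ w ∈ p, w ≤ v) (hx : ∀ w ∈ p, w ≤ x) :
    pvStepB (pvM p, (p.count (v - 1) : Int), some v, (p.count v : Int)) x
      = (pvM (p ++ [x]), ((p ++ [x]).count (x - 1) : Int), some x,
         ((p ++ [x]).count x : Int)) := by
  have hvx : v ≤ x := hx v hv
  have hcx : ∀ y : Int, y ≠ x → (p ++ [x]).count y = p.count y := by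
    intro y hy
    simp [List.count_append, Ne.symm hy]
  have hcxx : (p ++ [x]).count x = p.count x + 1 := by
    simp [List.count_append]
  have hTx : pvT (p ++ [x]) x = ((p ++ [x]).count (x - 1) : Int) + ((p ++ [x]).count x : Int) := rfl
  by_cases hvex : v = x
  · subst hvex
    -- duplicate of the current run
    unfold pvStepB
    dsimp only
    rw [if_pos rfl]
    have hc1 : ((p ++ [v]).count (v - 1) : Int) = (p.count (v - 1) : Int) := by
      rw [hcx (v - 1) (by omega)]
    have hbest : (if pvM p < (p.count (v - 1) : Int) + ((p.count v : Int) + 1)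
          then (p.count (v - 1) : Int) + ((p.count v : Int) + 1) else pvM p)
        = pvM (p ++ [v]) := by
      rw [pv_if_lt_eq_max]
      unfold pvM
      rw [pvF_append_singleton]
      have hTxv : pvT (p ++ [v]) v = (p.count (v - 1) : Int) + ((p.count v : Int) + 1) := by
        unfold pvT
        rw [hcx (v - 1) (by omega), hcxx]
        push_cast; ring
      rw [hTxv]
      have := pvF_key (pvT p) (pvT (p ++ [v])) ((p.count (v - 1) : Int) + ((p.count v : Int) + 1))
        p
        (by
          intro w hw
          unfold pvT
          by_cases hwx : w = v
          · rw [hwx, hcx (v - 1) (by omega), hcxx]; push_cast; omega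
          · rw [hcx w hwx, hcx (w - 1) (by have := hle w hw; omega)])
        (by
          intro w hw
          by_cases hwx : w = v
          · rw [hwx]
            have : pvT (p ++ [v]) v = (p.count (v - 1) : Int) + ((p.count v : Int) + 1) := by
              unfold pvT
              rw [hcx (v - 1) (by omega), hcxx]; push_cast; ring
            omega
          · have : pvT (p ++ [v]) w = pvT p w := by
              unfold pvT
              rw [hcx w hwx, hcx (w - 1) (by have := hle w hw; omega)]
            omega)
        0 0 le_rfl (by omega)
      omega
    rw [hbest, hc1, hcxx]
    push_cast
    ring_nf
  · -- a new value x > everything in p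
    have hvltx : v < x := by omega
    have hxnp : x ∉ p := by
      intro hxp
      have := hle x hxp
      omega
    have hcpx : p.count x = 0 := List.count_eq_zero.mpr hxnp
    unfold pvStepB
    dsimp only
    have hne : ¬ (some v = some x) := by simp [hvex]
    rw [if_neg hne]
    have hprev : (if (some v : Option Int) = some (x - 1) then (p.count v : Int) else 0)
        = ((p ++ [x]).count (x - 1) : Int) := by
      by_cases hv1 : v = x - 1
      · rw [if_pos (by rw [hv1]), hcx (x - 1) (by omega), hv1]
      · rw [if_neg (by simp [hv1])]
        have hxm1 : (x - 1) ∉ p := by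
          intro hmem
          have := hle _ hmem
          omega
        rw [hcx (x - 1) (by omega), List.count_eq_zero.mpr hxm1]
        simp
    have hcnt1 : ((p ++ [x]).count x : Int) = 1 := by
      rw [hcxx, hcpx]; simp
    have hTsame : ∀ w ∈ p, pvT (p ++ [x]) w = pvT p w := by
      intro w hw
      have hwv := hle w hw
      unfold pvT
      rw [hcx w (by omega), hcx (w - 1) (by omega)]
    have hbest : (if pvM p < ((p ++ [x]).count (x - 1) : Int) + 1
          then ((p ++ [x]).count (x - 1) : Int) + 1 else pvM p) = pvM (p ++ [x]) := by
      rw [pv_if_lt_eq_max]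
      unfold pvM
      rw [pvF_append_singleton]
      rw [pvF_congr_mem (pvT (p ++ [x])) (pvT p) p 0 hTsame]
      have : pvT (p ++ [x]) x = ((p ++ [x]).count (x - 1) : Int) + 1 := by
        rw [hTx, hcnt1]
      rw [this]
    rw [hprev, hbest, hcnt1]

-- folding B's step over the rest of a sorted list
theorem pv_foldB_inv : ∀ (rest p : List Int) (v : Int),
    (p ++ rest).Pairwise (· ≤ ·) → v ∈ p → (∀ w ∈ p, w ≤ v) →
    (rest.foldl pvStepB (pvM p, (p.count (v - 1) : Int), some v, (p.count v : Int))).1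
      = pvM (p ++ rest) := by
  intro rest
  induction rest with
  | nil => intro p v _ _ _; simp
  | cons x rest ih =>
    intro p v hpw hv hle
    have hx : ∀ w ∈ p, w ≤ x := by
      intro w hw
      have := (List.pairwise_append.mp hpw).2.2 w hw x List.mem_cons_self
      exact this
    simp only [List.foldl_cons]
    rw [pv_stepB_inv p v x hv hle hx]
    have hassoc : (p ++ [x]) ++ rest = p ++ (x :: rest) := by
      rw [List.append_assoc]; rfl
    have hpw' : ((p ++ [x]) ++ rest).Pairwise (· ≤ ·) := by rw [hassoc]; exact hpw
    have := ih (p ++ [x]) x hpw' (by simp)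
      (by
        intro w hw
        rcases List.mem_append.mp hw with h | h
        · exact hx w h
        · simp at h; omega)
    rw [this, hassoc]

-- B's whole loop on a sorted list computes pvM
theorem pv_foldB (s : List Int) (hs : s.Pairwise (· ≤ ·)) :
    (s.foldl pvStepB (0, 0, none, 0)).1 = pvM s := by
  cases s with
  | nil => simp [pvM, pvF]
  | cons x rest =>
    simp only [List.foldl_cons]
    have hstep : pvStepB (0, 0, none, 0) x
        = (pvM [x], (([x] : List Int).count (x - 1) : Int), some x, (([x] : List Int).count x : Int)) := by
      unfold pvStepB
      have h1 : ¬ ((none : Option Int) = some x) := by simp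
      have h2 : ¬ ((none : Option Int) = some (x - 1)) := by simp
      simp only [if_neg h1, if_neg h2]
      have hc1 : (([x] : List Int).count x : Int) = 1 := by simp
      have hc0 : (([x] : List Int).count (x - 1) : Int) = 0 := by
        rw [List.count_eq_zero.mpr (by simp : (x - 1) ∉ [x])]
        simp
      have hM : pvM [x] = 1 := by
        unfold pvM pvF pvT
        simp only [List.foldl_cons, List.foldl_nil]
        rw [hc0, hc1]
        norm_num
      rw [hc1, hc0, hM]
      norm_num
    rw [hstep]
    have hpre : ([x] ++ rest).Pairwise (· ≤ ·) := by simpa using hs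
    have := pv_foldB_inv rest [x] x hpre (by simp) (by intro w hw; simp at hw; omega)
    simpa using this

-- bridge: pvM over the sorted copy equals the max of count v + count (v+1) over the unique values
theorem pv_bridge (N s u : List Int)
    (hs : ∀ y, y ∈ s ↔ y ∈ N) (hcs : ∀ y : Int, s.count y = N.count y)
    (hu : ∀ y, y ∈ u ↔ y ∈ N) :
    pvM s = u.foldl (fun mg v => max mg ((N.count v : Int) + (N.count (v + 1) : Int))) 0 := by
  have hR : u.foldl (fun mg v => max mg ((N.count v : Int) + (N.count (v + 1) : Int))) 0
      = pvF (fun v => (N.count v : Int) + (N.count (v + 1) : Int)) 0 u := rfl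
  rw [hR]
  apply le_antisymm
  · rw [pvM, pvF_le_iff]
    refine ⟨pvF_le_self _ _ _, ?_⟩
    intro w hw
    have hTw : pvT s w = (N.count (w - 1) : Int) + (N.count w : Int) := by
      unfold pvT; rw [hcs, hcs]
    rw [hTw]
    by_cases hmem : (w - 1) ∈ u
    · have h := pvF_mem_le (fun v : Int => (N.count v : Int) + (N.count (v + 1) : Int)) 0 u (w - 1) hmem
      simp only at h
      have heq : w - 1 + 1 = w := by ring
      rw [heq] at h
      omega
    · have hz : N.count (w - 1) = 0 := by
        rw [List.count_eq_zero]
        intro hmem2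
        exact hmem ((hu _).mpr hmem2)
      have hwu : w ∈ u := (hu w).mpr ((hs w).mp hw)
      have h := pvF_mem_le (fun v : Int => (N.count v : Int) + (N.count (v + 1) : Int)) 0 u w hwu
      simp only at h
      rw [hz]
      simp only [Nat.cast_zero, zero_add]
      omega
  · rw [pvF_le_iff]
    refine ⟨pvF_le_self _ _ _, ?_⟩
    intro v hv
    show (N.count v : Int) + (N.count (v + 1) : Int) ≤ pvM s
    by_cases hmem : (v + 1) ∈ s
    · have := pvF_mem_le (pvT s) 0 s (v + 1) hmem
      have hT : pvT s (v + 1) = (N.count v : Int) + (N.count (v + 1) : Int) := by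
        unfold pvT
        have : v + 1 - 1 = v := by ring
        rw [this, hcs, hcs]
      rw [hT] at this
      exact this
    · have hz : N.count (v + 1) = 0 := by
        rw [List.count_eq_zero]
        intro hmem2
        exact hmem ((hs _).mpr hmem2)
      have hvs : v ∈ s := (hs v).mpr ((hu v).mp hv)
      have := pvF_mem_le (pvT s) 0 s v hvs
      have hT : (N.count v : Int) ≤ pvT s v := by
        unfold pvT; rw [hcs, hcs]; omega
      rw [hz]
      simp only [Nat.cast_zero, add_zero]
      unfold pvM
      omega

-- ===== VERDICT =====
theorem find_min_deleted_spec : Claim_equal_find_min_deleted := by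
  unfold Claim_equal_find_min_deleted
  intro n numbers _
  unfold Spec_find_min_deleted find_min_deleted find_min_deleted_alt
  by_cases h1 : n = 1
  · simp [h1]
  · simp only [if_neg h1]
    have hfreq : ∀ v, (List.foldl (fun d x => d.insert x (d.getD x 0 + 1)) PySem.Dict.empty
        (PySem.List.sorted numbers (fun x => x) false)).getD v 0 = (numbers.count v : Int) := by
      intro v
      rw [PySem.Dict.getD_foldl_insert_add_one,
          ((PySem.List.sorted_perm numbers (fun x => x) false).count_eq v)]
      simp [PySem.Dict.getD_empty]
    have hmem : ∀ x, x ∈ PySem.List.sorted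
        (PySem.Set.ofList (PySem.List.sorted numbers (fun x => x) false)) (fun x => x) false
        ↔ x ∈ numbers := by
      intro x
      rw [PySem.List.mem_sorted, PySem.Set.mem_ofList, PySem.List.mem_sorted]
    have hp := PySem.List.sorted_ofList_pairwise_lt
      (PySem.List.sorted numbers (fun x => x) false)
    rw [pv_foldA numbers _ _ hfreq hmem hp]
    have hsorted : (PySem.List.sorted numbers (fun x => x) false).Pairwise (· ≤ ·) :=
      PySem.List.sorted_pairwise numbers (fun x => x)
    rw [pv_foldB _ hsorted]
    rw [pv_bridge numbers (PySem.List.sorted numbers (fun x => x) false) _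
      (fun y => PySem.List.mem_sorted _ _ _ _)
      (fun y => (PySem.List.sorted_perm numbers (fun x => x) false).count_eq y)
      hmem]
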